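-- pv_equiv track=rewrite | github.com/Jardynq/pm4py-dcr | pm4py/algo/discovery/dfg/utils/dfg_utils.py | max_occ_all_activ
-- ===== SOURCE A (Python) =====
-- def get_outgoing_edges(dfg):
--     """
--     Gets outgoing edges of the provided DFG graph
--     """
--     outgoing = {}
--     for el in dfg:
--         if type(el[0]) is str:
--             if not el[0] in outgoing:
--                 outgoing[el[0]] = {}
--             outgoing[el[0]][el[1]] = dfg[el]
--         else:
--             if not el[0][0] in outgoing:
--                 outgoing[el[0][0]] = {}
--             outgoing[el[0][0]][el[0][1]] = el[1]
--     return outgoing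
--
-- def get_ingoing_edges(dfg):
--     """
--     Get ingoing edges of the provided DFG graph
--     """
--     ingoing = {}
--     for el in dfg:
--         if type(el[0]) is str:
--             if not el[1] in ingoing:
--                 ingoing[el[1]] = {}
--             ingoing[el[1]][el[0]] = dfg[el]
--         else:
--             if not el[0][1] in ingoing:
--                 ingoing[el[0][1]] = {}
--             ingoing[el[0][1]][el[0][0]] = el[1]
--     return ingoing
--
-- def sum_ingoutg_val_activ(dictio, activity):
--     """
--     Gets the sum of ingoing/outgoing values of an activity
--
--     Parameters
--     -----------
--     dictio
--         Dictionary
--     activity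
--         Current examined activity
--
--     Returns
--     -----------
--     summ
--     """
--     summ = 0
--     for act2 in dictio[activity]:
--         summ += dictio[activity][act2]
--     return summ
--
-- def max_occ_all_activ(dfg):
--     """
--     Get maximum ingoing/outgoing sum of values related to attributes in DFG graph
--     """
--     ingoing = get_ingoing_edges(dfg)
--     outgoing = get_outgoing_edges(dfg)
--     max_value = -1
--
--     for act in ingoing:
--         summ = sum_ingoutg_val_activ(ingoing, act)
--         if summ > max_value:
--             max_value = summ
--
--     for act in outgoing:
--         summ = sum_ingoutg_val_activ(outgoing, act)
--         if summ > max_value: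
--             max_value = summ
--
--     return max_value
-- ===== SOURCE B (Python) =====
-- def max_occ_all_activ(dfg):
--     """
--     Get maximum ingoing/outgoing sum of values related to attributes in DFG graph.
--     Single pass accumulating flat per-activity sums; no nested dict-of-dicts index
--     and no separate per-activity summation loop.
--     """
--     in_sum = {}
--     out_sum = {}
--     for el in dfg:
--         if type(el[0]) is str:
--             source, target, value = el[0], el[1], dfg[el]
--         else:
--             source, target, value = el[0][0], el[0][1], el[1]
--         in_sum[target] = in_sum.get(target, 0) + value
--         out_sum[source] = out_sum.get(source, 0) + value
--     best = -1
--     for v in in_sum.values():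
--         if v > best:
--             best = v
--     for v in out_sum.values():
--         if v > best:
--             best = v
--     return best
-- ===== Notes on version B (the rewrite author's own statement) =====
-- stated objective: faster
-- what changed: B replaces A's two nested dict-of-dicts indexes plus a separate per-activity summation loop with a single pass over dfg that accumulates two flat per-activity sum dicts, then takes the max of their values.
import Mathlib
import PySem

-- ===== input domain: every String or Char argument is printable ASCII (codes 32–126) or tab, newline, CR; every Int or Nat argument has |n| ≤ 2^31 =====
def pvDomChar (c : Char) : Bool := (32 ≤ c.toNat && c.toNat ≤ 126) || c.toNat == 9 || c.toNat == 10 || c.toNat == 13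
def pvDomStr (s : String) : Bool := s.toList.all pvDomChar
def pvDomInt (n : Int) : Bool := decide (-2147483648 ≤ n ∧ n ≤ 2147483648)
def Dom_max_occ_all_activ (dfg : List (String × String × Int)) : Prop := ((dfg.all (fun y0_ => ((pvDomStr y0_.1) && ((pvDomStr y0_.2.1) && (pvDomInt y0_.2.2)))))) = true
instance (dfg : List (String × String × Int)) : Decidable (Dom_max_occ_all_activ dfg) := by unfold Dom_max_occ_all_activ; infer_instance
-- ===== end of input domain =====

-- B replaces A's two nested dict-of-dicts indexes plus separate per-activity summation
-- loops by one pass over dfg accumulating two flat per-activity sum dicts (objective: faster, constant-factor).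
-- dfg is a Python dict keyed by (source, target) pairs, modelled as the association list
-- (source, target, value); iterating the dict visits each key once and dfg[el] is the
-- value stored at the visited key el, i.e. the third component here.

-- ===== PORT A =====
def get_outgoing_edges (dfg : List (String × String × Int)) : PySem.Dict String (PySem.Dict String Int) :=
  dfg.foldl
    (fun outgoing el =>
      outgoing.insert el.1 ((outgoing.getD el.1 PySem.Dict.empty).insert el.2.1 el.2.2))
    PySem.Dict.empty

def get_ingoing_edges (dfg : List (String × String × Int)) : PySem.Dict String (PySem.Dict String Int) :=
  dfg.foldl
    (fun ingoing el =>
      ingoing.insert el.2.1 ((ingoing.getD el.2.1 PySem.Dict.empty).insert el.1 el.2.2))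
    PySem.Dict.empty

def sum_ingoutg_val_activ (dictio : PySem.Dict String (PySem.Dict String Int)) (activity : String) : Int :=
  (dictio.getD activity PySem.Dict.empty).keys.foldl
    (fun summ act2 => summ + (dictio.getD activity PySem.Dict.empty).getD act2 0) 0

def max_occ_all_activ (dfg : List (String × String × Int)) : Int :=
  let ingoing := get_ingoing_edges dfg
  let outgoing := get_outgoing_edges dfg
  let max_value : Int := -1
  let max_value := ingoing.keys.foldl
    (fun max_value act =>
      let summ := sum_ingoutg_val_activ ingoing act
      if summ > max_value then summ else max_value) max_value
  let max_value := outgoing.keys.foldl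
    (fun max_value act =>
      let summ := sum_ingoutg_val_activ outgoing act
      if summ > max_value then summ else max_value) max_value
  max_value

-- ===== PORT B =====
def max_occ_all_activ_alt (dfg : List (String × String × Int)) : Int :=
  let sums := dfg.foldl
    (fun (p : PySem.Dict String Int × PySem.Dict String Int) el =>
      (p.1.insert el.2.1 (p.1.getD el.2.1 0 + el.2.2),
       p.2.insert el.1 (p.2.getD el.1 0 + el.2.2)))
    (PySem.Dict.empty, PySem.Dict.empty)
  let best := sums.1.values.foldl (fun best v => if v > best then v else best) (-1)
  sums.2.values.foldl (fun best v => if v > best then v else best) best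

-- ===== PRECONDITION & SPEC =====
-- Pre_ excludes association lists with a duplicate (source, target) key: those do not
-- represent any Python dict (A's input type), so A never receives them.
def Pre_max_occ_all_activ (dfg : List (String × String × Int)) : Prop :=
  (dfg.map (fun el => (el.1, el.2.1))).Nodup
instance (dfg : List (String × String × Int)) : Decidable (Pre_max_occ_all_activ dfg) := by
  unfold Pre_max_occ_all_activ; infer_instance

def pvWitness_max_occ_all_activ : (List (String × String × Int)) :=
  [("a", "b", 3), ("b", "b", 2), ("b", "c", 5)]

def Spec_max_occ_all_activ (dfg : List (String × String × Int)) (out : Int) : Prop := out = max_occ_all_activ_alt dfg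
instance (dfg : List (String × String × Int)) (out : Int) : Decidable (Spec_max_occ_all_activ dfg out) := by unfold Spec_max_occ_all_activ; infer_instance

-- ===== CLAIM (what is proved, stated in full; the proofs are below) =====
def Claim_equal_max_occ_all_activ : Prop := ∀ (dfg : List (String × String × Int)), Dom_max_occ_all_activ dfg → Pre_max_occ_all_activ dfg → Spec_max_occ_all_activ dfg (max_occ_all_activ dfg)

-- ===== LEMMAS AND PROOFS =====

lemma pv_values_sum_insert (inner : PySem.Dict String Int) (s : String) (v : Int)
    (h : inner.contains s = false) :
    (inner.insert s v).values.sum = inner.values.sum + v := by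
  simp [PySem.Dict.values, PySem.Dict.items_insert_of_not_contains _ _ h]

lemma pv_keys_eq (nd : PySem.Dict String (PySem.Dict String Int)) (fd : PySem.Dict String Int)
    (hrel : fd.items = nd.items.map (fun p => (p.1, p.2.values.sum))) :
    fd.keys = nd.keys := by
  simp [PySem.Dict.keys, hrel, List.map_map, Function.comp]

lemma pv_step {α : Type} (src tgt : α → String) (val : α → Int)
    (nd : PySem.Dict String (PySem.Dict String Int)) (fd : PySem.Dict String Int) (e : α)
    (hnd : nd.keys.Nodup)
    (hinner : ∀ p ∈ nd.items, p.2.keys.Nodup)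
    (hrel : fd.items = nd.items.map (fun p => (p.1, p.2.values.sum)))
    (hfr : (nd.getD (tgt e) PySem.Dict.empty).contains (src e) = false) :
    (fd.insert (tgt e) (fd.getD (tgt e) 0 + val e)).items
      = ((nd.insert (tgt e) ((nd.getD (tgt e) PySem.Dict.empty).insert (src e) (val e))).items.map
          (fun p => (p.1, p.2.values.sum)))
    ∧ (nd.insert (tgt e) ((nd.getD (tgt e) PySem.Dict.empty).insert (src e) (val e))).keys.Nodup
    ∧ ∀ p ∈ (nd.insert (tgt e) ((nd.getD (tgt e) PySem.Dict.empty).insert (src e) (val e))).items,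
        p.2.keys.Nodup := by
  have hkeys : fd.keys = nd.keys := pv_keys_eq nd fd hrel
  refine ⟨?_, PySem.Dict.nodup_keys_insert _ _ _ hnd, ?_⟩
  · by_cases hc : nd.contains (tgt e) = true
    · have hcf : fd.contains (tgt e) = true := by
        rw [PySem.Dict.contains_iff_mem_keys] at hc ⊢; rw [hkeys]; exact hc
      rw [PySem.Dict.items_insert_of_contains _ _ hc,
          PySem.Dict.items_insert_of_contains _ _ hcf, hrel, List.map_map, List.map_map]
      refine List.map_congr_left ?_
      intro p hp
      simp only [Function.comp]
      by_cases ht : p.1 = tgt e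
      · have hpm : (p.1, p.2) ∈ nd.items := hp
        have hinner_eq : nd.getD (tgt e) PySem.Dict.empty = p.2 := by
          rw [← ht]; exact PySem.Dict.getD_of_mem_items _ hpm hnd _
        have hfd : fd.getD (tgt e) 0 = p.2.values.sum := by
          have : (p.1, p.2.values.sum) ∈ fd.items := by
            rw [hrel]; exact List.mem_map.mpr ⟨p, hp, rfl⟩
          rw [← ht]
          exact PySem.Dict.getD_of_mem_items _ this (by rw [pv_keys_eq nd fd hrel]; exact hnd) _
        simp only [ht, beq_self_eq_true, if_true, hinner_eq]
        rw [pv_values_sum_insert _ _ _ (hinner_eq ▸ hfr), hfd]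
      · simp [ht]
    · have hc' : nd.contains (tgt e) = false := by simpa using hc
      have hcf : fd.contains (tgt e) = false := by
        by_contra h
        have h' : fd.contains (tgt e) = true := by simpa using h
        have hm := (PySem.Dict.contains_iff_mem_keys fd _).mp h'
        rw [hkeys] at hm
        exact absurd ((PySem.Dict.contains_iff_mem_keys nd _).mpr hm) (by simp [hc'])
      rw [PySem.Dict.items_insert_of_not_contains _ _ hcf,
          PySem.Dict.items_insert_of_not_contains _ _ hc', hrel, List.map_append,
          PySem.Dict.getD_of_not_contains _ _ hcf, PySem.Dict.getD_of_not_contains _ _ hc']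
      simp [PySem.Dict.values, PySem.Dict.empty, PySem.Dict.insert, PySem.Dict.contains]
  · intro p hp
    rcases (PySem.Dict.mem_items_insert _ _ _ _).mp hp with h | ⟨h, _⟩
    · subst h
      apply PySem.Dict.nodup_keys_insert
      by_cases hc : nd.contains (tgt e) = true
      · obtain ⟨inner0, hk⟩ : ∃ x, (tgt e, x) ∈ nd.items := by
          simpa [PySem.Dict.keys] using (PySem.Dict.contains_iff_mem_keys _ _).mp hc
        rw [PySem.Dict.getD_of_mem_items _ hk hnd]
        exact hinner _ hk
      · rw [PySem.Dict.getD_of_not_contains _ _ (by simpa using hc)]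
        exact PySem.Dict.nodup_keys_empty
    · exact hinner _ h

lemma pv_build {α : Type} (src tgt : α → String) (val : α → Int) :
    ∀ (l : List α) (nd : PySem.Dict String (PySem.Dict String Int)) (fd : PySem.Dict String Int),
    nd.keys.Nodup →
    (∀ p ∈ nd.items, p.2.keys.Nodup) →
    fd.items = nd.items.map (fun p => (p.1, p.2.values.sum)) →
    (l.map (fun e => (tgt e, src e))).Nodup →
    (∀ e ∈ l, (nd.getD (tgt e) PySem.Dict.empty).contains (src e) = false) →
    (l.foldl (fun d e => d.insert (tgt e) (d.getD (tgt e) 0 + val e)) fd).items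
      = (l.foldl (fun d e => d.insert (tgt e) ((d.getD (tgt e) PySem.Dict.empty).insert (src e) (val e))) nd).items.map
          (fun p => (p.1, p.2.values.sum))
    ∧ (l.foldl (fun d e => d.insert (tgt e) ((d.getD (tgt e) PySem.Dict.empty).insert (src e) (val e))) nd).keys.Nodup
    ∧ ∀ p ∈ (l.foldl (fun d e => d.insert (tgt e) ((d.getD (tgt e) PySem.Dict.empty).insert (src e) (val e))) nd).items,
        p.2.keys.Nodup := by
  intro l
  induction l with
  | nil => intro nd fd hnd hinner hrel _ _; exact ⟨hrel, hnd, hinner⟩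
  | cons e rest ih =>
    intro nd fd hnd hinner hrel hkeysnd hfr
    simp only [List.foldl_cons]
    have hfr_e := hfr e (List.mem_cons_self ..)
    obtain ⟨hrel', hnd', hinner'⟩ := pv_step src tgt val nd fd e hnd hinner hrel hfr_e
    have hpair : (∀ x ∈ rest, tgt x = tgt e → ¬ src x = src e) ∧
        (rest.map (fun e => (tgt e, src e))).Nodup := by simpa using hkeysnd
    refine ih _ _ hnd' hinner' hrel' hpair.2 ?_
    intro x hx
    rw [PySem.Dict.getD_insert]
    by_cases ht : tgt x = tgt e
    · rw [if_pos ht, PySem.Dict.contains_insert]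
      simp only [Bool.or_eq_false_iff, beq_eq_false_iff_ne, ne_eq]
      exact ⟨hpair.1 x hx ht, by rw [← ht]; exact hfr x (List.mem_cons_of_mem _ hx)⟩
    · rw [if_neg ht]; exact hfr x (List.mem_cons_of_mem _ hx)

lemma pv_maxloop (nd : PySem.Dict String (PySem.Dict String Int)) (fd : PySem.Dict String Int)
    (init : Int)
    (hnd : nd.keys.Nodup)
    (hinner : ∀ p ∈ nd.items, p.2.keys.Nodup)
    (hrel : fd.items = nd.items.map (fun p => (p.1, p.2.values.sum))) :
    nd.keys.foldl
      (fun max_value act =>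
        let summ := sum_ingoutg_val_activ nd act
        if summ > max_value then summ else max_value) init
    = fd.values.foldl (fun best v => if v > best then v else best) init := by
  have hvals : fd.values = nd.keys.map (fun k => (nd.getD k PySem.Dict.empty).values.sum) := by
    rw [PySem.Dict.values, hrel, List.map_map,
        PySem.Dict.items_eq_map_keys nd hnd PySem.Dict.empty, List.map_map]
    rfl
  rw [hvals, List.foldl_map]
  refine PySem.List.foldl_congr_mem _ _ _ _ ?_
  intro acc k hk
  obtain ⟨inner0, hk0⟩ : ∃ x, (k, x) ∈ nd.items := by
    simpa [PySem.Dict.keys] using hk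
  have hg : nd.getD k PySem.Dict.empty = inner0 := PySem.Dict.getD_of_mem_items _ hk0 hnd _
  have hknd : inner0.keys.Nodup := hinner _ hk0
  have : sum_ingoutg_val_activ nd k = (nd.getD k PySem.Dict.empty).values.sum := by
    rw [sum_ingoutg_val_activ, hg, PySem.List.foldl_add,
        PySem.Dict.values_eq_map_keys inner0 hknd 0]
    simp
  simp only [this]

-- ===== VERDICT (by name: the statement is the Claim_ definition above) =====
theorem max_occ_all_activ_spec : Claim_equal_max_occ_all_activ := by
  intro dfg _ hpre
  unfold Spec_max_occ_all_activ
  show max_occ_all_activ dfg = max_occ_all_activ_alt dfg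
  replace hpre : (dfg.map (fun el => (el.1, el.2.1))).Nodup := hpre
  have hpreI : (dfg.map (fun e : String × String × Int => (e.2.1, e.1))).Nodup := by
    have h2 := hpre.map Prod.swap_injective
    simpa [List.map_map, Function.comp, Prod.swap] using h2
  have hempty_items : (PySem.Dict.empty : PySem.Dict String (PySem.Dict String Int)).items = [] := rfl
  have hinit_rel : (PySem.Dict.empty : PySem.Dict String Int).items
      = (PySem.Dict.empty : PySem.Dict String (PySem.Dict String Int)).items.map
          (fun p => (p.1, p.2.values.sum)) := rfl
  have hfresh : ∀ (t s : String),
      ((PySem.Dict.empty : PySem.Dict String (PySem.Dict String Int)).getD t PySem.Dict.empty).contains s = false := by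
    intro t s; rw [PySem.Dict.getD_empty]; exact PySem.Dict.contains_empty _
  obtain ⟨hrelI, hndI, hinnerI⟩ :=
    pv_build (fun e : String × String × Int => e.1) (fun e => e.2.1) (fun e => e.2.2) dfg
      PySem.Dict.empty PySem.Dict.empty PySem.Dict.nodup_keys_empty
      (by rw [hempty_items]; intro p hp; cases hp) hinit_rel hpreI
      (fun e _ => hfresh _ _)
  obtain ⟨hrelO, hndO, hinnerO⟩ :=
    pv_build (fun e : String × String × Int => e.2.1) (fun e => e.1) (fun e => e.2.2) dfg
      PySem.Dict.empty PySem.Dict.empty PySem.Dict.nodup_keys_empty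
      (by rw [hempty_items]; intro p hp; cases hp) hinit_rel hpre
      (fun e _ => hfresh _ _)
  show
    (get_outgoing_edges dfg).keys.foldl
      (fun max_value act =>
        let summ := sum_ingoutg_val_activ (get_outgoing_edges dfg) act
        if summ > max_value then summ else max_value)
      ((get_ingoing_edges dfg).keys.foldl
        (fun max_value act =>
          let summ := sum_ingoutg_val_activ (get_ingoing_edges dfg) act
          if summ > max_value then summ else max_value) (-1))
    = max_occ_all_activ_alt dfg
  rw [max_occ_all_activ_alt]
  rw [PySem.List.foldl_prod_mk
    (f := fun (d : PySem.Dict String Int) (el : String × String × Int) =>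
      d.insert el.2.1 (d.getD el.2.1 0 + el.2.2))
    (g := fun (d : PySem.Dict String Int) (el : String × String × Int) =>
      d.insert el.1 (d.getD el.1 0 + el.2.2))]
  rw [pv_maxloop (get_ingoing_edges dfg) _ (-1) hndI hinnerI hrelI,
      pv_maxloop (get_outgoing_edges dfg) _ _ hndO hinnerO hrelO]
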